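-- pv_equiv track=rewrite | github.com/theBLUSpycrab/WhatDoWeWant_Bot | custom_logic.py | multiway_match_strings
-- ===== SOURCE A (Python) =====
-- from typing import List, Tuple, Any
--
-- def multiway_match_strings(lists: List[List[Any]], names: List[Any] = None) -> Tuple[List[Tuple[str, int, List[Any]]], List[str], List[str], int]:
--     """
--     Find matches across N sorted lists of unique strings.
--
--     Args:
--         lists: list of sorted string lists
--         names: optional list of identifiers for the lists (same length as lists) If None, defaults to list indices [0..N-1]
--
--     Returns:
--         all_matches: list of tuples (string, count, [list_names])
--         full_matches: strings appearing in all lists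
--         partial_matches: strings appearing in more than one list but not all
--         max_count: maximum number of lists any string appeared in
--     """
--     N = len(lists)
--     if names is None:
--         names = list(range(N))  # default list identifiers
--
--     # Initialize pointers for each list
--     pointers = [0] * N
--     all_matches = []
--
--     while True:
--         # Gather current values from each list where pointer hasn't reached the end
--         current_vals = []
--         for i in range(N):
--             if pointers[i] < len(lists[i]):
--                 current_vals.append((lists[i][pointers[i]], i))
--
--         if not current_vals:
--             break  # All lists are exhausted
--
--         # Find the smallest string among current pointers
--         min_val = min(val for val, _ in current_vals)
--
--         # Track which lists contain this string
--         matched_lists = []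
--         for val, idx in current_vals:
--             if val == min_val:
--                 matched_lists.append(names[idx])
--                 pointers[idx] += 1  # advance pointer for this list
--
--         # Record the string, count, and list names
--         all_matches.append((min_val, len(matched_lists), matched_lists))
--
--     # Extract full matches, partial matches, and maximum overlap
--     full_matches = [s for s, count, _ in all_matches if count == N]
--     partial_matches = [s for s, count, _ in all_matches if 1 < count < N]
--     max_count = max(count for _, count, _ in all_matches) if all_matches else 0
--
--     return all_matches, full_matches, partial_matches, max_count
-- ===== SOURCE B (Python) =====
-- def multiway_match_strings(lists, names=None):
--     # Same k-way merge result, but maintained as a shrinking list of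
--     # (remaining-suffix, name) pairs: exhausted lists are dropped instead of
--     # being re-scanned each round, and full/partial/max are accumulated in the
--     # same single pass instead of post-hoc comprehensions.
--     N = len(lists)
--     if names is None:
--         names = list(range(N))
--     active = [(lists[i], names[i]) for i in range(N) if lists[i]]
--     all_matches = []
--     full_matches = []
--     partial_matches = []
--     max_count = 0
--     while active:
--         m = min(lst[0] for lst, _ in active)
--         matched = [name for lst, name in active if lst[0] == m]
--         cnt = len(matched)
--         all_matches.append((m, cnt, matched))
--         if cnt > max_count:
--             max_count = cnt
--         if cnt == N:
--             full_matches.append(m)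
--         elif cnt > 1:
--             partial_matches.append(m)
--         active = [(lst[1:] if lst[0] == m else lst, name)
--                   for lst, name in active]
--         active = [(lst, name) for lst, name in active if lst]
--     return all_matches, full_matches, partial_matches, max_count
-- ===== Notes on version B (the rewrite author's own statement) =====
-- stated objective: alternative
-- what changed: A rescans all N lists every round via a pointer array and computes full/partial/max by post-hoc passes over all_matches; B maintains a shrinking list of (remaining-suffix, name) pairs so exhausted lists are dropped from the scan, and accumulates all_matches, full_matches, partial_matches and max_count in the same single pass.
import Mathlib
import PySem

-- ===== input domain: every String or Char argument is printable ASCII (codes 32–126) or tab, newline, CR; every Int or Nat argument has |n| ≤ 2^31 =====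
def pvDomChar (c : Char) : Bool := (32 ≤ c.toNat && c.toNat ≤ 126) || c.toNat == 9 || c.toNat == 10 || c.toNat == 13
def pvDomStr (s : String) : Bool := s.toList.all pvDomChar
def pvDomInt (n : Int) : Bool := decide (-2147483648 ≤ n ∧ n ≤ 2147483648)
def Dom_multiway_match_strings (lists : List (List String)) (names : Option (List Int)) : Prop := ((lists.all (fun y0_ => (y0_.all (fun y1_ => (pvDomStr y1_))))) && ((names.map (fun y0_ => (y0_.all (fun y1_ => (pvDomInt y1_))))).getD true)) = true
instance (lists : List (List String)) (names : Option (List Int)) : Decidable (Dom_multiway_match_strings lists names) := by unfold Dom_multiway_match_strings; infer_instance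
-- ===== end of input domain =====

-- B replaces A's pointer array (rescanned over all N lists every round) by a shrinking
-- list of (remaining-suffix, name) pairs and accumulates full/partial/max in the same
-- single pass instead of post-hoc comprehensions (objective: alternative).

-- ===== PORT A =====
-- current_vals: (lists[i][pointers[i]], i) for each i with pointers[i] < len(lists[i])
-- (the parallel walk over lists/pointers carrying the index i is Python's 'for i in range(N)';
--  lists[i][pointers[i]] with 0 ≤ pointers[i] < len is List.getD, exact here)
def pvGatherA : List (List String) → List Nat → Nat → List (String × Nat)
  | [], _, _ => []
  | _ :: _, [], _ => []
  | l :: ls, p :: ps, i => (if p < l.length then [(l.getD p "", i)] else []) ++ pvGatherA ls ps (i + 1)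

-- body of 'for val, idx in current_vals: if val == min_val: matched.append(names[idx]); pointers[idx] += 1'
-- (names[idx] is in range under Pre_, so List.getD is exact; pointers[idx] += 1 is List.set)
def pvAStep (ns : List Int) (m : String) (st : List Int × List Nat) (e : String × Nat) : List Int × List Nat :=
  if e.1 == m then (st.1 ++ [ns.getD e.2 0], st.2.set e.2 (st.2.getD e.2 0 + 1)) else st

-- the 'while True' loop; fuel = total number of elements + 1 always suffices since each
-- round advances at least one pointer (fuel = 0 is never reached from the top-level call)
def pvLoopA (lists : List (List String)) (ns : List Int) : Nat → List Nat → List (String × Int × List Int)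
  | 0, _ => []
  | fuel + 1, ptrs =>
    let cv := pvGatherA lists ptrs 0
    if cv.isEmpty then []
    else
      let m := (PySem.List.min? (cv.map (·.1)) (fun x => x)).getD ""
      let st := cv.foldl (pvAStep ns m) ([], ptrs)
      (m, (st.1.length : Int), st.1) :: pvLoopA lists ns fuel st.2

def multiway_match_strings (lists : List (List String)) (names : Option (List Int)) : (List (String × Int × List Int)) × List String × List String × Int :=
  let N := lists.length
  let ns := match names with | none => PySem.List.pyRange 0 (N : Int) 1 | some v => v
  let ams := pvLoopA lists ns ((lists.map List.length).sum + 1) (List.replicate N 0)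
  let full := (ams.filter (fun e => e.2.1 == (N : Int))).map (·.1)
  let part := (ams.filter (fun e => decide (1 < e.2.1) && decide (e.2.1 < (N : Int)))).map (·.1)
  let mx := (PySem.List.max? (ams.map (fun e => e.2.1)) (fun x => x)).getD 0
  (ams, full, part, mx)

-- ===== PORT B =====
-- active = [(lists[i], names[i]) for i in range(N) if lists[i]]  (names[i] only read when
-- lists[i] is nonempty, exactly as Python's filtered comprehension)
def pvInitB : List (List String) → List Int → List (List String × Int)
  | [], _ => []
  | _ :: _, [] => []
  | l :: ls, n :: ns => (if l.isEmpty then [] else [(l, n)]) ++ pvInitB ls ns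

-- the 'while active' loop with the four accumulators returned on the way out
-- (lst[1:] on a nonempty list is List.drop 1; same fuel bound as A's loop)
def pvLoopB (N : Nat) : Nat → List (List String × Int) → (List (String × Int × List Int)) × List String × List String × Int
  | 0, _ => ([], [], [], 0)
  | fuel + 1, active =>
    if active.isEmpty then ([], [], [], 0)
    else
      let m := (PySem.List.min? (active.map (fun e => e.1.headD "")) (fun x => x)).getD ""
      let matched := (active.filter (fun e => e.1.headD "" == m)).map (·.2)
      let cnt := matched.length
      let active' := (active.map (fun e => (if e.1.headD "" == m then e.1.drop 1 else e.1, e.2))).filter (fun e => !e.1.isEmpty)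
      let r := pvLoopB N fuel active'
      ((m, (cnt : Int), matched) :: r.1,
       if cnt = N then m :: r.2.1 else r.2.1,
       if 1 < cnt ∧ cnt ≠ N then m :: r.2.2.1 else r.2.2.1,
       if (cnt : Int) > r.2.2.2 then (cnt : Int) else r.2.2.2)

def multiway_match_strings_alt (lists : List (List String)) (names : Option (List Int)) : (List (String × Int × List Int)) × List String × List String × Int :=
  let N := lists.length
  let ns := match names with | none => PySem.List.pyRange 0 (N : Int) 1 | some v => v
  pvLoopB N ((lists.map List.length).sum + 1) (pvInitB lists ns)

-- ===== PRECONDITION & SPEC =====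
-- Pre_ excludes exactly the inputs where Python A raises IndexError: an explicit names list
-- too short to cover the index of some nonempty input list (every nonempty list's index is
-- eventually matched, so A evaluates names[i] there; B raises the same way in its initial
-- comprehension).  With names = None the getD default is lists.length, making the bound trivial.
def Pre_multiway_match_strings (lists : List (List String)) (names : Option (List Int)) : Prop :=
  ∀ i, i < lists.length → lists.getD i [] ≠ [] → i < (names.map List.length).getD lists.length
instance (lists : List (List String)) (names : Option (List Int)) : Decidable (Pre_multiway_match_strings lists names) := by unfold Pre_multiway_match_strings; infer_instance
def pvWitness_multiway_match_strings : List (List String) × Option (List Int) := ([["a", "b"], ["b"]], none)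

def Spec_multiway_match_strings (lists : List (List String)) (names : Option (List Int)) (out : (List (String × Int × List Int)) × List String × List String × Int) : Prop := out = multiway_match_strings_alt lists names
instance (lists : List (List String)) (names : Option (List Int)) (out : (List (String × Int × List Int)) × List String × List String × Int) : Decidable (Spec_multiway_match_strings lists names out) := by unfold Spec_multiway_match_strings; infer_instance

-- ===== CLAIM (what is proved, stated in full; the proofs are below) =====
def Claim_equal_multiway_match_strings : Prop := ∀ (lists : List (List String)) (names : Option (List Int)), Dom_multiway_match_strings lists names → Pre_multiway_match_strings lists names → Spec_multiway_match_strings lists names (multiway_match_strings lists names)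

-- ===== LEMMAS AND PROOFS =====

-- the invariant shape: B's active list, as a function of A's pointers
def pvActOf : List (List String) → List Nat → List Int → List (List String × Int)
  | l :: ls, p :: ps, n :: ns => (if (l.drop p).isEmpty then [] else [(l.drop p, n)]) ++ pvActOf ls ps ns
  | _, _, _ => []

-- A's pointers after one round on min-string m
def pvBump (m : String) : List (List String) → List Nat → List Nat
  | l :: ls, p :: ps => (if p < l.length ∧ l.getD p "" = m then p + 1 else p) :: pvBump m ls ps
  | _, ps => ps

-- A's matched names in one round on min-string m
def pvMatchedN (m : String) : List (List String) → List Nat → List Int → List Int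
  | l :: ls, p :: ps, n :: ns => (if p < l.length ∧ l.getD p "" = m then [n] else []) ++ pvMatchedN m ls ps ns
  | _, _, _ => []

-- A's post-processing of all_matches
def pvPost (N : Nat) (ms : List (String × Int × List Int)) : (List (String × Int × List Int)) × List String × List String × Int :=
  (ms,
   (ms.filter (fun e => e.2.1 == (N : Int))).map (·.1),
   (ms.filter (fun e => decide (1 < e.2.1) && decide (e.2.1 < (N : Int)))).map (·.1),
   (PySem.List.max? (ms.map (fun e => e.2.1)) (fun x => x)).getD 0)

lemma pv_getD_pad (ns : List Int) (k i : Nat) : (ns ++ List.replicate k 0).getD i 0 = ns.getD i 0 := by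
  by_cases h : i < ns.length
  · exact List.getD_append ns _ 0 i h
  · rw [List.getD_append_right _ _ _ _ (by omega)]
    simp only [List.getD, List.getElem?_replicate]
    rw [List.getElem?_eq_none (by omega)]
    split_ifs <;> simp

lemma pv_astep_pad (ns : List Int) (k : Nat) (m : String) : pvAStep (ns ++ List.replicate k 0) m = pvAStep ns m := by
  funext st e
  simp only [pvAStep]
  rw [pv_getD_pad]

lemma pv_loopA_pad (lists : List (List String)) (ns : List Int) (k fuel : Nat) (ptrs : List Nat) :
    pvLoopA lists (ns ++ List.replicate k 0) fuel ptrs = pvLoopA lists ns fuel ptrs := by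
  induction fuel generalizing ptrs with
  | zero => rfl
  | succ fuel ih => simp only [pvLoopA, pv_astep_pad, ih]

lemma pv_init_eq_actOf (ls : List (List String)) : ∀ (ns : List Int),
    pvInitB ls ns = pvActOf ls (List.replicate ls.length 0) ns := by
  induction ls with
  | nil => intro ns; rfl
  | cons l ls ih =>
    intro ns
    cases ns with
    | nil => rfl
    | cons n nss => simp [pvInitB, pvActOf, List.replicate, ih]

lemma pv_init_empty (ls : List (List String)) : ∀ (ns : List Int), (∀ i, i < ls.length → ls.getD i [] = []) →
    pvInitB ls ns = [] := by
  induction ls with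
  | nil => intro ns _; rfl
  | cons l ls ih =>
    intro ns h
    cases ns with
    | nil => rfl
    | cons n nss =>
      have h0 : l = [] := h 0 (by simp) 
      simp only [pvInitB, h0]
      simp only [List.isEmpty_nil, if_pos rfl, List.nil_append]
      exact ih nss (fun i hi => h (i + 1) (by simpa using Nat.succ_lt_succ hi))

lemma pv_init_pad (ls : List (List String)) : ∀ (ns : List Int) (k : Nat),
    (∀ i, i < ls.length → ls.getD i [] ≠ [] → i < ns.length) →
    pvInitB ls ns = pvInitB ls (ns ++ List.replicate k 0) := by
  induction ls with
  | nil => intro ns k _; rfl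
  | cons l ls ih =>
    intro ns k h
    cases ns with
    | nil =>
      have h0 : l = [] := by
        by_contra hne
        exact absurd (h 0 (by simp) (by simpa using hne)) (by simp)
      have hall : ∀ i, i < ls.length → ls.getD i [] = [] := by
        intro i hi
        by_contra hne
        exact absurd (h (i + 1) (by simpa using Nat.succ_lt_succ hi) (by simpa using hne)) (by simp)
      rw [pv_init_empty (l :: ls) [] (by
        intro i hi
        cases i with
        | zero => simpa using h0
        | succ j => exact hall j (by simpa using hi))]
      cases k with
      | zero => rfl
      | succ k' =>
        simp only [List.nil_append, List.replicate, pvInitB, h0, List.isEmpty_nil, if_pos rfl]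
        rw [pv_init_empty ls _ hall]
        rfl
    | cons n nss =>
      simp only [pvInitB, List.cons_append]
      rw [ih nss k (fun i hi hne => by
        have := h (i + 1) (by simpa using Nat.succ_lt_succ hi) (by simpa using hne)
        simpa using this)]

lemma pv_map_heads (ls : List (List String)) : ∀ (ps : List Nat) (ns : List Int) (i : Nat),
    ps.length = ls.length → ls.length ≤ ns.length →
    (pvActOf ls ps ns).map (fun e => e.1.headD "") = (pvGatherA ls ps i).map (·.1) := by
  induction ls with
  | nil => intro ps ns i h1 _; cases ps with
    | nil => rfl
    | cons p ps => simp at h1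
  | cons l ls ih =>
    intro ps ns i h1 h2
    cases ps with
    | nil => simp at h1
    | cons p ps =>
      cases ns with
      | nil => simp at h2
      | cons n nss =>
        simp only [pvActOf, pvGatherA, List.map_append]
        rw [ih ps nss (i + 1) (by simpa using h1) (by simpa using h2)]
        congr 1
        by_cases hp : p < l.length
        · rw [if_neg (by simp [List.isEmpty_iff, List.drop_eq_nil_iff]; omega), if_pos hp]
          simp [List.headD_eq_head?, List.head?_drop, List.getD]
        · rw [if_pos (by simp [List.isEmpty_iff, List.drop_eq_nil_iff]; omega), if_neg hp]
          rfl

lemma pv_len_actOf (ls : List (List String)) : ∀ (ps : List Nat) (ns : List Int),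
    (pvActOf ls ps ns).length ≤ ls.length := by
  induction ls with
  | nil => intro ps ns; cases ps <;> cases ns <;> simp [pvActOf]
  | cons l ls ih =>
    intro ps ns
    cases ps with
    | nil => simp [pvActOf]
    | cons p ps =>
      cases ns with
      | nil => simp [pvActOf]
      | cons n nss =>
        simp only [pvActOf, List.length_append, List.length_cons]
        have := ih ps nss
        split_ifs <;> simp <;> omega

lemma pv_bump_len (m : String) (ls : List (List String)) : ∀ (ps : List Nat),
    ps.length = ls.length → (pvBump m ls ps).length = ls.length := by
  induction ls with
  | nil => intro ps h; cases ps with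
    | nil => rfl
    | cons p ps => simp at h
  | cons l ls ih =>
    intro ps h
    cases ps with
    | nil => simp at h
    | cons p ps => simp only [pvBump, List.length_cons]; rw [ih ps (by simpa using h)]

lemma pv_foldl_max (l : List Int) : ∀ (a b : Int), l.foldl max (max a b) = max (l.foldl max a) b := by
  induction l with
  | nil => intro a b; rfl
  | cons c l ih =>
    intro a b
    simp only [List.foldl_cons]
    rw [show max (max a b) c = max (max a c) b by rw [max_right_comm], ih]

lemma pv_foldA (ns : List Int) (m : String) : ∀ (ls : List (List String)) (ps : List Nat) (i : Nat) (ps0 : List Nat) (acc : List Int),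
    ps0.length = i → i + ls.length ≤ ns.length →
    (pvGatherA ls ps i).foldl (pvAStep ns m) (acc, ps0 ++ ps) =
      (acc ++ pvMatchedN m ls ps (ns.drop i), ps0 ++ pvBump m ls ps) := by
  intro ls
  induction ls with
  | nil => intro ps i ps0 acc h0 h; simp [pvGatherA, pvMatchedN, pvBump]
  | cons l ls ih =>
    intro ps i ps0 acc h0 h
    cases ps with
    | nil => simp [pvGatherA, pvMatchedN, pvBump]
    | cons p ps =>
      have hi : i < ns.length := by simp at h; omega
      have hdrop : ns.drop i = ns[i] :: ns.drop (i + 1) := List.drop_eq_getElem_cons hi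
      have hget : ns.getD i 0 = ns[i] := List.getD_eq_getElem ns 0 hi
      have hsetp : ∀ v : Nat, (ps0 ++ p :: ps).set i v = ps0 ++ v :: ps := by
        intro v
        rw [List.set_append_right _ _ (by omega)]
        simp [h0]
      have hgetp : (ps0 ++ p :: ps).getD i 0 = p := by
        rw [List.getD_append_right _ _ _ _ (by omega)]
        simp [h0]
      simp only [pvGatherA, pvMatchedN, pvBump, hdrop]
      by_cases hp : p < l.length
      · rw [if_pos hp]
        by_cases hm : l.getD p "" = m
        · rw [if_pos ⟨hp, hm⟩, if_pos ⟨hp, hm⟩]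
          have hstep : pvAStep ns m (acc, ps0 ++ p :: ps) (l.getD p "", i) =
              (acc ++ [ns[i]], (ps0 ++ [p + 1]) ++ ps) := by
            simp only [pvAStep, hm, beq_self_eq_true, if_pos]
            rw [hgetp, hsetp, hget]
            simp
          rw [List.cons_append, List.nil_append, List.foldl_cons, hstep,
            ih ps (i + 1) (ps0 ++ [p + 1]) (acc ++ [ns[i]]) (by simp [h0]) (by simp at h ⊢; omega)]
          simp
        · rw [if_neg (by tauto), if_neg (by tauto)]
          have hstep : pvAStep ns m (acc, ps0 ++ p :: ps) (l.getD p "", i) =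
              (acc, (ps0 ++ [p]) ++ ps) := by
            simp only [pvAStep]
            rw [if_neg (by simpa using hm)]
            simp
          rw [List.cons_append, List.nil_append, List.foldl_cons, hstep,
            ih ps (i + 1) (ps0 ++ [p]) acc (by simp [h0]) (by simp at h ⊢; omega)]
          simp
      · rw [if_neg hp, if_neg (by tauto), if_neg (by tauto)]
        rw [List.nil_append,
          show ps0 ++ p :: ps = (ps0 ++ [p]) ++ ps by simp,
          ih ps (i + 1) (ps0 ++ [p]) acc (by simp [h0]) (by simp at h ⊢; omega)]
        simp

lemma pv_matched_eq (m : String) (ls : List (List String)) : ∀ (ps : List Nat) (ns : List Int),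
    ps.length = ls.length → ls.length ≤ ns.length →
    pvMatchedN m ls ps ns = ((pvActOf ls ps ns).filter (fun e => e.1.headD "" == m)).map (·.2) := by
  induction ls with
  | nil => intro ps ns h1 h2; cases ps with
    | nil => cases ns <;> rfl
    | cons p ps => simp at h1
  | cons l ls ih =>
    intro ps ns h1 h2
    cases ps with
    | nil => simp at h1
    | cons p ps =>
      cases ns with
      | nil => simp at h2
      | cons n nss =>
        simp only [pvMatchedN, pvActOf, List.filter_append, List.map_append]
        rw [← ih ps nss (by simpa using h1) (by simpa using h2)]
        congr 1
        by_cases hp : p < l.length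
        · have hne : ¬ (l.drop p).isEmpty := by simp [List.isEmpty_iff, List.drop_eq_nil_iff]; omega
          have hhd : (l.drop p).headD "" = l.getD p "" := by
            simp [List.head?_drop, List.getD]
          rw [if_neg hne]
          by_cases hm : l.getD p "" = m
          · rw [if_pos ⟨hp, hm⟩]
            have hm' : l[p]?.getD "" = m := hm
            simp [List.filter_cons, hhd, hm']
          · rw [if_neg (by tauto)]
            have hm' : ¬ l[p]?.getD "" = m := hm
            simp [List.filter_cons, hhd, hm']
        · have he : (l.drop p).isEmpty := by simp [List.isEmpty_iff, List.drop_eq_nil_iff]; omega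
          rw [if_pos he, if_neg (by tauto)]
          rfl

lemma pv_act_bump (m : String) (ls : List (List String)) : ∀ (ps : List Nat) (ns : List Int),
    ps.length = ls.length → ls.length ≤ ns.length →
    pvActOf ls (pvBump m ls ps) ns =
      ((pvActOf ls ps ns).map (fun e => (if e.1.headD "" == m then e.1.drop 1 else e.1, e.2))).filter (fun e => !e.1.isEmpty) := by
  induction ls with
  | nil => intro ps ns h1 h2; cases ps with
    | nil => cases ns <;> rfl
    | cons p ps => simp at h1
  | cons l ls ih =>
    intro ps ns h1 h2
    cases ps with
    | nil => simp at h1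
    | cons p ps =>
      cases ns with
      | nil => simp at h2
      | cons n nss =>
        simp only [pvBump, pvActOf, List.map_append, List.filter_append]
        rw [← ih ps nss (by simpa using h1) (by simpa using h2)]
        congr 1
        by_cases hp : p < l.length
        · have hne : ¬ (l.drop p).isEmpty := by simp [List.isEmpty_iff, List.drop_eq_nil_iff]; omega
          have hhd : (l.drop p).headD "" = l.getD p "" := by
            simp [List.head?_drop, List.getD]
          rw [if_neg hne]
          by_cases hm : l.getD p "" = m
          · have hb : (if p < l.length ∧ l.getD p "" = m then p + 1 else p) = p + 1 := if_pos ⟨hp, hm⟩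
            have hm' : l[p]?.getD "" = m := hm
            have hdd : (l.drop p).drop 1 = l.drop (p + 1) := by
              rw [List.drop_drop]
            rw [hb]
            by_cases hend : (l.drop (p+1)).isEmpty
            · simp [List.filter_cons, hhd, hm', hdd, hend]
            · simp [List.filter_cons, hhd, hm', hdd, hend]
          · have hb : (if p < l.length ∧ l.getD p "" = m then p + 1 else p) = p := if_neg (by tauto)
            have hm' : ¬ l[p]?.getD "" = m := hm
            rw [hb]
            simp [List.filter_cons, hhd, hm', hne]
        · have he : (l.drop p).isEmpty := by simp [List.isEmpty_iff, List.drop_eq_nil_iff]; omega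
          have hb : (if p < l.length ∧ l.getD p "" = m then p + 1 else p) = p := if_neg (by tauto)
          rw [hb, if_pos he]
          rfl

lemma pv_main (ls : List (List String)) (ns : List Int) (hns : ls.length ≤ ns.length) :
    ∀ (fuel : Nat) (ps : List Nat), ps.length = ls.length →
    pvLoopB ls.length fuel (pvActOf ls ps ns) = pvPost ls.length (pvLoopA ls ns fuel ps) := by
  intro fuel
  induction fuel with
  | zero =>
    intro ps _
    simp [pvLoopB, pvLoopA, pvPost, PySem.List.max?]
  | succ fuel ih =>
    intro ps hps
    have hmap := pv_map_heads ls ps ns 0 hps hns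
    simp only [pvLoopA, pvLoopB]
    by_cases hcv : (pvGatherA ls ps 0).isEmpty
    · have hact : (pvActOf ls ps ns).isEmpty := by
        have := congrArg List.length hmap
        simp only [List.length_map] at this
        simp [List.isEmpty_iff, List.length_eq_zero_iff] at hcv ⊢
        rw [← List.length_eq_zero_iff, this, hcv]
        rfl
      rw [if_pos hcv, if_pos hact]
      simp [pvPost, PySem.List.max?]
    · have hact : ¬ (pvActOf ls ps ns).isEmpty := by
        have := congrArg List.length hmap
        simp only [List.length_map] at this
        simp [List.isEmpty_iff, ← List.length_eq_zero_iff] at hcv ⊢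
        omega
      rw [if_neg hcv, if_neg hact, hmap]
      set m := (PySem.List.min? ((pvGatherA ls ps 0).map (·.1)) (fun x => x)).getD "" with hm
      have hfold := pv_foldA ns m ls ps 0 [] [] rfl (by omega)
      simp only [List.nil_append, List.drop_zero] at hfold
      rw [hfold]
      have hmatched := pv_matched_eq m ls ps ns hps hns
      have hbump := pv_act_bump m ls ps ns hps hns
      rw [← hbump, ih (pvBump m ls ps) (pv_bump_len m ls ps hps)]
      -- notation
      set M := pvMatchedN m ls ps ns with hM
      set ams := pvLoopA ls ns fuel (pvBump m ls ps) with hams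
      have hMB : M = ((pvActOf ls ps ns).filter (fun e => e.1.headD "" == m)).map (·.2) := hmatched
      -- count bounds
      have hcntle : M.length ≤ ls.length := by
        rw [hMB]
        simp only [List.length_map]
        exact le_trans (List.length_filter_le _ _) (pv_len_actOf ls ps ns)
      have hcntpos : 0 < M.length := by
        have hne : (pvActOf ls ps ns).map (fun e => e.1.headD "") ≠ [] := by
          intro h0
          rw [List.map_eq_nil_iff] at h0
          exact hact (by simp [h0])
        obtain ⟨m0, hm0⟩ : ∃ m0, PySem.List.min? ((pvActOf ls ps ns).map (fun e => e.1.headD "")) (fun x => x) = some m0 := by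
          cases h : PySem.List.min? ((pvActOf ls ps ns).map (fun e => e.1.headD "")) (fun x => x) with
          | none => exact absurd ((PySem.List.min?_eq_none_iff _ _).mp h) hne
          | some v => exact ⟨v, rfl⟩
        have hmem : m0 ∈ (pvActOf ls ps ns).map (fun e => e.1.headD "") := PySem.List.min?_mem hm0
        have hmm : m = m0 := by
          rw [hmap] at hm0
          rw [hm, hm0]
          rfl
        obtain ⟨e, he, heq⟩ := List.mem_map.mp hmem
        rw [hMB]
        simp only [List.length_map]
        have hef : e ∈ (pvActOf ls ps ns).filter (fun e => e.1.headD "" == m) := by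
          rw [List.mem_filter]
          exact ⟨he, by simpa [hmm] using heq⟩
        exact List.length_pos_of_mem hef
      -- final tuple
      rw [← hMB]
      simp only [pvPost, List.filter_cons, List.map_cons, Prod.mk.injEq]
      refine ⟨by trivial, ?_, ?_, ?_⟩
      · by_cases hc : M.length = ls.length
        · have hcond : (((M.length : Int)) == ((ls.length : Int))) = true := by simp [hc]
          rw [if_pos hc, hcond]
          simp
        · have hcond : (((M.length : Int)) == ((ls.length : Int))) = false := by
            simp only [beq_eq_false_iff_ne, ne_eq]
            exact_mod_cast hc
          rw [if_neg hc, hcond]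
          simp
      · by_cases hc : 1 < M.length ∧ M.length ≠ ls.length
        · have hcond : (decide ((1:Int) < (M.length : Int)) && decide ((M.length : Int) < (ls.length : Int))) = true := by
            simp only [Bool.and_eq_true, decide_eq_true_eq]
            refine ⟨by exact_mod_cast hc.1, by
              have h2 := hc.2
              have : M.length < ls.length := by omega
              exact_mod_cast this⟩
          rw [if_pos hc, hcond]
          simp
        · have h3 : ¬((1:Int) < (M.length : Int) ∧ (M.length : Int) < (ls.length : Int)) := by
            rintro ⟨a, b⟩
            have a' : 1 < M.length := by exact_mod_cast a
            have b' : M.length < ls.length := by exact_mod_cast b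
            exact hc ⟨a', by omega⟩
          have hcond : (decide ((1:Int) < (M.length : Int)) && decide ((M.length : Int) < (ls.length : Int))) = false := by
            simpa using h3
          rw [if_neg hc, hcond]
          simp
      · cases hl : ams.map (fun e => e.2.1) with
        | nil =>
          simp only [PySem.List.max?_id_cons]
          have hnone : PySem.List.max? ([] : List Int) (fun x => x) = none :=
            (PySem.List.max?_eq_none_iff _ _).mpr rfl
          simp only [hnone, List.foldl_nil, Option.getD_some, Option.getD_none]
          rw [if_pos (by exact_mod_cast hcntpos)]
        | cons c rest =>
          simp only [PySem.List.max?_id_cons]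
          simp only [Option.getD_some, List.foldl_cons]
          have hfm : rest.foldl max (max (M.length : Int) c) = max (rest.foldl max c) (M.length : Int) := by
            rw [max_comm (M.length : Int) c]
            exact pv_foldl_max rest c _
          rw [hfm]
          by_cases h : (rest.foldl max c) < (M.length : Int)
          · rw [if_pos h, max_eq_right (le_of_lt h)]
          · rw [if_neg h, max_eq_left (by omega)]


-- ===== VERDICT (by name: the statement is the Claim_ definition above) =====
theorem multiway_match_strings_spec : Claim_equal_multiway_match_strings := by
  intro lists names _hdom hpre
  unfold Spec_multiway_match_strings
  unfold Pre_multiway_match_strings at hpre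
  cases names with
  | none =>
    have hlen : lists.length ≤ (PySem.List.pyRange 0 (lists.length : Int) 1).length := by
      rw [PySem.List.pyRange_zero_natCast]
      simp
    show multiway_match_strings lists none = multiway_match_strings_alt lists none
    unfold multiway_match_strings multiway_match_strings_alt
    simp only []
    rw [pv_init_eq_actOf, pv_main lists _ hlen _ _ (by simp)]
    rfl
  | some ns =>
    have hcond : ∀ i, i < lists.length → lists.getD i [] ≠ [] → i < ns.length := by
      simpa using hpre
    have hlenE : lists.length ≤ (ns ++ List.replicate lists.length 0).length := by
      simp
    show multiway_match_strings lists (some ns) = multiway_match_strings_alt lists (some ns)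
    unfold multiway_match_strings multiway_match_strings_alt
    simp only []
    rw [pv_init_pad lists ns lists.length hcond, pv_init_eq_actOf,
      pv_main lists _ hlenE _ _ (by simp), pv_loopA_pad]
    rfl
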